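-- pv_equiv track=rewrite | github.com/east-lee/Algorithm | Programmers/[월간코드챌린지시즌2]2번문제.py | solution
-- ===== SOURCE A (Python) =====
-- def solution(numbers):
--   answer = []
--   for number in numbers:
--     bin_num = list(str(bin(number)))[2:]
--     if bin_num[-1] == '0':
--       answer.append(number + 1)
--     else:
--       cnt = 0
--       for i in bin_num[::-1]:
--         if i == '1':
--           cnt += 1
--         else:
--           break
--       answer.append(number + 2 ** (cnt - 1))
--   return answer
-- ===== SOURCE B (Python) =====
-- def solution(numbers):
--     res = []
--     for number in numbers:
--         m = abs(number)
--         if m % 2 == 0: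
--             res.append(number + 1)
--         else:
--             cnt = (m ^ (m + 1)).bit_length() - 1
--             res.append(number + 2 ** (cnt - 1))
--     return res
-- ===== Notes on version B (the rewrite author's own statement) =====
-- stated objective: faster
-- what changed: Replaces A's binary-string construction plus inner character-scan loop for trailing ones with a closed-form bit trick: cnt = (m ^ (m+1)).bit_length() - 1 on m = abs(number), and a parity test instead of inspecting the last character.
import Mathlib
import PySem

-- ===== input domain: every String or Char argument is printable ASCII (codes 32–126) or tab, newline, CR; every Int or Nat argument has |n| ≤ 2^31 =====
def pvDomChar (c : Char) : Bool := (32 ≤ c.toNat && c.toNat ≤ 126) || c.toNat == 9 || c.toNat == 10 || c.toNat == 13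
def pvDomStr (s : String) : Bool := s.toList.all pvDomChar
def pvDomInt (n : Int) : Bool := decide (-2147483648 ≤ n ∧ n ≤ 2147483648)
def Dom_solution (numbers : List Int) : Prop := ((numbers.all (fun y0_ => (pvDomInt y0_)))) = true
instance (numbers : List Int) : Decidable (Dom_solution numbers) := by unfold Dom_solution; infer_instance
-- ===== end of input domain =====

-- B replaces A's binary-string construction and inner character-scan for trailing ones
-- with a closed-form bit trick on abs(number); return values are proved equal for all inputs.

-- ===== PORT A =====
-- inner 'for i in bin_num[::-1]: if i == '1': cnt += 1 else: break'
def cntLoopA : List Char → Int → Int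
  | [], cnt => cnt
  | i :: rest, cnt => if i = '1' then cntLoopA rest (cnt + 1) else cnt

def solution (numbers : List Int) : List Int :=
  numbers.foldl (fun answer number =>
    -- bin_num = list(str(bin(number)))[2:]
    let bin_num := PySem.List.slice (PySem.Int.toBinChars0b number) (some 2) none
    if PySem.List.pyGet? bin_num (-1) == some '0' then
      answer ++ [number + 1]
    else
      let cnt := cntLoopA bin_num.reverse 0
      answer ++ [number + 2 ^ (cnt - 1).toNat]) []

-- ===== PORT B =====
def solution_alt (numbers : List Int) : List Int :=
  numbers.foldl (fun res number =>
    let m : Int := (number.natAbs : Int)          -- m = abs(number)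
    if PySem.Int.mod m 2 == 0 then
      res ++ [number + 1]
    else
      let cnt : Nat := PySem.Int.bitLength (PySem.Int.bxor m (m + 1)) - 1
      res ++ [number + 2 ^ (cnt - 1)]) []

-- ===== PRECONDITION & SPEC =====
def Spec_solution (numbers : List Int) (out : List Int) : Prop := out = solution_alt numbers
instance (numbers : List Int) (out : List Int) : Decidable (Spec_solution numbers out) := by unfold Spec_solution; infer_instance

-- ===== CLAIM (what is proved, stated in full; the proofs are below) =====
def Claim_equal_solution : Prop := ∀ (numbers : List Int), Dom_solution numbers → Spec_solution numbers (solution numbers)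

-- ===== LEMMAS AND PROOFS =====

-- structural form of Nat.toDigits 2 (msb-first binary digits)
def myBin (n : Nat) : List Char :=
  if n < 2 then [Nat.digitChar n]
  else myBin (n / 2) ++ [Nat.digitChar (n % 2)]
decreasing_by omega

-- trailing ones of a natural number
def tOnes (m : Nat) : Nat :=
  if m % 2 = 1 then tOnes (m / 2) + 1 else 0
decreasing_by omega

lemma toDigitsCore_eq_myBin : ∀ (f n : Nat) (acc : List Char), n < f →
    Nat.toDigitsCore 2 f n acc = myBin n ++ acc := by
  intro f
  induction f with
  | zero => omega
  | succ f ih =>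
    intro n acc h
    rw [Nat.toDigitsCore]
    by_cases h2 : n < 2
    · have : n / 2 = 0 := by omega
      have hdc : Nat.digitChar (n % 2) = Nat.digitChar n := by
        congr 1; omega
      rw [this, if_pos rfl, hdc]
      conv_rhs => rw [myBin]
      rw [if_pos h2]
      rfl
    · have hd : ¬ n / 2 = 0 := by omega
      rw [if_neg hd, ih _ _ (by omega)]
      conv_rhs => rw [myBin]
      rw [if_neg h2]
      simp

lemma toDigits_eq_myBin (n : Nat) : Nat.toDigits 2 n = myBin n :=
  (toDigitsCore_eq_myBin (n + 1) n [] (by omega)).trans (by simp)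

lemma myBin_ne_nil (n : Nat) : myBin n ≠ [] := by
  rw [myBin]; split <;> simp

lemma myBin_getLast? (n : Nat) : (myBin n).getLast? = some (Nat.digitChar (n % 2)) := by
  rw [myBin]
  split
  · rename_i h
    have : n % 2 = n := by omega
    simp [this]
  · simp

lemma cntLoopA_append_not_one (xs : List Char) (ch : Char) (hch : ch ≠ '1') (c : Int) :
    cntLoopA (xs ++ [ch]) c = cntLoopA xs c := by
  induction xs generalizing c with
  | nil => simp [cntLoopA, hch]
  | cons i rest ih =>
    simp only [List.cons_append, cntLoopA]
    split
    · exact ih _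
    · rfl

lemma cntLoopA_myBin_reverse (m : Nat) : ∀ c : Int,
    cntLoopA (myBin m).reverse c = c + (tOnes m : Int) := by
  induction m using Nat.strong_induction_on with
  | _ m ih =>
    intro c
    rw [myBin]
    by_cases h2 : m < 2
    · rw [if_pos h2]
      interval_cases m
      · rw [tOnes]
        simp only [List.reverse_singleton, cntLoopA, if_neg (by decide : ¬ Nat.digitChar 0 = '1')]
        simp
      · rw [tOnes, if_pos rfl, tOnes]
        simp only [List.reverse_singleton, cntLoopA, if_pos (by decide : Nat.digitChar 1 = '1')]
        simp
    · rw [if_neg h2, List.reverse_append, List.reverse_singleton, List.singleton_append,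
        cntLoopA]
      rw [tOnes]
      by_cases hpar : m % 2 = 1
      · have hd : Nat.digitChar (m % 2) = '1' := by rw [hpar]; rfl
        rw [if_pos hd, if_pos hpar, ih (m / 2) (by omega) (c + 1)]
        push_cast; ring
      · have hm0 : m % 2 = 0 := by omega
        have hd : ¬ Nat.digitChar (m % 2) = '1' := by rw [hm0]; decide
        rw [if_neg hd, if_neg hpar]
        simp
      
lemma xor_succ_eq (m : Nat) : m ^^^ (m + 1) = 2 ^ (tOnes m + 1) - 1 := by
  induction m using Nat.strong_induction_on with
  | _ m ih =>
    rw [tOnes]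
    by_cases hpar : m % 2 = 1
    · rw [if_pos hpar]
      have h1 : m = Nat.bit true (m / 2) := by simp [Nat.bit]; omega
      have h2 : m + 1 = Nat.bit false (m / 2 + 1) := by simp [Nat.bit]; omega
      calc m ^^^ (m + 1) = Nat.bit true (m / 2) ^^^ Nat.bit false (m / 2 + 1) := by
              rw [← h1, ← h2]
        _ = Nat.bit (true != false) (m / 2 ^^^ (m / 2 + 1)) := Nat.xor_bit ..
        _ = 2 * (m / 2 ^^^ (m / 2 + 1)) + 1 := by simp [Nat.bit]; try ring
        _ = 2 * (2 ^ (tOnes (m / 2) + 1) - 1) + 1 := by rw [ih (m / 2) (by omega)]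
        _ = 2 ^ (tOnes (m / 2) + 1 + 1) - 1 := by
              have : 1 ≤ 2 ^ (tOnes (m / 2) + 1) := Nat.one_le_two_pow
              ring_nf; omega
    · rw [if_neg hpar]
      have h1 : m = Nat.bit false (m / 2) := by simp [Nat.bit]; omega
      have h2 : m + 1 = Nat.bit true (m / 2) := by simp [Nat.bit]; omega
      calc m ^^^ (m + 1) = Nat.bit false (m / 2) ^^^ Nat.bit true (m / 2) := by
              rw [← h1, ← h2]
        _ = Nat.bit (false != true) (m / 2 ^^^ m / 2) := Nat.xor_bit ..
        _ = 2 ^ (0 + 1) - 1 := by simp [Nat.bit]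
      
lemma bitLength_two_pow_sub_one (t : Nat) :
    PySem.Int.bitLength ((2 ^ (t + 1) - 1 : Nat) : Int) = t + 1 := by
  induction t with
  | zero => decide
  | succ t ih =>
    rw [PySem.Int.bitLength_natCast (m := 2 ^ (t + 1 + 1) - 1) (by have : 2 ^ 1 ≤ 2 ^ (t + 1 + 1) := Nat.pow_le_pow_right (by omega) (by omega); omega)]
    have : (2 ^ (t + 1 + 1) - 1) / 2 = 2 ^ (t + 1) - 1 := by
      have : 1 ≤ 2 ^ (t + 1) := Nat.one_le_two_pow
      omega
    rw [this, ih]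

lemma tOnes_pos_of_odd (m : Nat) (h : m % 2 = 1) : 1 ≤ tOnes m := by
  rw [tOnes, if_pos h]; omega

-- getLast? ignores a cons before a nonempty list
lemma getLast?_cons_ne (l : List Char) (c : Char) (h : l ≠ []) :
    (c :: l).getLast? = l.getLast? := by
  cases l with
  | nil => exact absurd rfl h
  | cons a t => simp [List.getLast?_cons_cons]

-- per-element agreement of the two loop bodies
lemma step_eq (answer : List Int) (number : Int) :
    (let bin_num := PySem.List.slice (PySem.Int.toBinChars0b number) (some 2) none
     if PySem.List.pyGet? bin_num (-1) == some '0' then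
       answer ++ [number + 1]
     else
       let cnt := cntLoopA bin_num.reverse 0
       answer ++ [number + 2 ^ (cnt - 1).toNat])
    =
    (let m : Int := (number.natAbs : Int)
     if PySem.Int.mod m 2 == 0 then
       answer ++ [number + 1]
     else
       let cnt : Nat := PySem.Int.bitLength (PySem.Int.bxor m (m + 1)) - 1
       answer ++ [number + 2 ^ (cnt - 1)]) := by
  simp only []
  set m := number.natAbs with hm
  have hbin : (PySem.List.slice (PySem.Int.toBinChars0b number) (some 2) none) =
      (if number < 0 then 'b' :: myBin m else myBin m) := by
    have hs := PySem.List.slice_from_natCast (PySem.Int.toBinChars0b number) 2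
    norm_num at hs
    rw [hs, PySem.Int.toBinChars0b]
    split
    · simp [toDigits_eq_myBin, hm]
    · rename_i h
      have : number.toNat = m := by omega
      simp [toDigits_eq_myBin, this]
  have hlast : PySem.List.pyGet?
      (PySem.List.slice (PySem.Int.toBinChars0b number) (some 2) none) (-1)
      = some (Nat.digitChar (m % 2)) := by
    rw [PySem.List.pyGet?_neg_one, hbin]
    split
    · rw [getLast?_cons_ne _ _ (myBin_ne_nil m), myBin_getLast?]
    · exact myBin_getLast? m
  have hmod : PySem.Int.mod (m : Int) 2 = ((m % 2 : Nat) : Int) :=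
    PySem.Int.mod_natCast m 2
  by_cases hpar : m % 2 = 0
  · -- even branch on both sides
    have hA : (PySem.List.pyGet?
        (PySem.List.slice (PySem.Int.toBinChars0b number) (some 2) none) (-1)
        == some '0') = true := by rw [hlast, hpar]; decide
    have hB : (PySem.Int.mod (m : Int) 2 == 0) = true := by rw [hmod, hpar]; decide
    rw [hA, hB, if_pos rfl, if_pos rfl]
  · have hpar1 : m % 2 = 1 := by omega
    have hA : (PySem.List.pyGet?
        (PySem.List.slice (PySem.Int.toBinChars0b number) (some 2) none) (-1)
        == some '0') = false := by rw [hlast, hpar1]; decide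
    have hB : (PySem.Int.mod (m : Int) 2 == 0) = false := by rw [hmod, hpar1]; decide
    rw [hA, hB, if_neg (by simp), if_neg (by simp)]
    -- both take the odd branch; show the added powers agree
    have hcnt : cntLoopA (PySem.List.slice (PySem.Int.toBinChars0b number)
        (some 2) none).reverse 0 = (tOnes m : Int) := by
      rw [hbin]
      split
      · rw [List.reverse_cons, cntLoopA_append_not_one _ 'b' (by decide),
          cntLoopA_myBin_reverse]
        ring
      · rw [cntLoopA_myBin_reverse]; ring
    have hxor : PySem.Int.bxor (m : Int) ((m : Int) + 1)
        = ((2 ^ (tOnes m + 1) - 1 : Nat) : Int) := by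
      have h1 : ((m : Int) + 1) = ((m + 1 : Nat) : Int) := by push_cast; ring
      rw [h1, PySem.Int.bxor_natCast, xor_succ_eq]
    have hbl : PySem.Int.bitLength (PySem.Int.bxor (m : Int) ((m : Int) + 1))
        = tOnes m + 1 := by rw [hxor, bitLength_two_pow_sub_one]
    rw [hcnt, hbl]
    have ht1 := tOnes_pos_of_odd m hpar1
    have hexp : (((tOnes m : Int)) - 1).toNat = tOnes m + 1 - 1 - 1 := by omega
    rw [hexp]

-- foldl with pointwise-equal step functions
lemma foldl_ext (f g : List Int → Int → List Int) (h : ∀ a x, f a x = g a x) :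
    ∀ (numbers : List Int) (acc : List Int),
      numbers.foldl f acc = numbers.foldl g acc := by
  intro numbers
  induction numbers with
  | nil => intro acc; rfl
  | cons x xs ih => intro acc; simp only [List.foldl, h acc x]; exact ih _

-- ===== VERDICT (by name: the statement is the Claim_ definition above) =====
theorem solution_spec : Claim_equal_solution := by
  intro numbers _
  unfold Spec_solution solution solution_alt
  exact foldl_ext _ _ (fun a x => step_eq a x) numbers []
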